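-- pv_equiv track=rewrite | github.com/wys166/sEMGDataProcess | Regression/RegressionProcessFun.py | SingleClassSeparate
-- ===== SOURCE A (Python) =====
-- def SingleClassSeparate(predict_y, true_y, true_y_label):
--     y_label = [1, 2, 3, 4, 5]#label
--     length = len(true_y_label)
--
--     predict_y_class1 = []
--     predict_y_class2 = []
--     predict_y_class3 = []
--     predict_y_class4 = []
--     predict_y_class5 = []
--
--     true_y_class1 = []
--     true_y_class2 = []
--     true_y_class3 = []
--     true_y_class4 = []
--     true_y_class5 = []
--
--     i=0
--     while i<length:
--         if true_y_label[i] == y_label[0]: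
--             predict_y_class1.append(predict_y[i])
--             true_y_class1.append(true_y[i])
--         elif true_y_label[i] == y_label[1]:
--             predict_y_class2.append(predict_y[i])
--             true_y_class2.append(true_y[i])
--         elif true_y_label[i] == y_label[2]:
--             predict_y_class3.append(predict_y[i])
--             true_y_class3.append(true_y[i])
--         elif true_y_label[i] == y_label[3]:
--             predict_y_class4.append(predict_y[i])
--             true_y_class4.append(true_y[i])
--         elif true_y_label[i] == y_label[4]:
--             predict_y_class5.append(predict_y[i])
--             true_y_class5.append(true_y[i])
--
--         i=i+1
--
--     predict_y = [predict_y_class1, predict_y_class2, predict_y_class3, predict_y_class4, predict_y_class5]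
--     true_y = [true_y_class1, true_y_class2, true_y_class3, true_y_class4, true_y_class5]
--     return predict_y, true_y
-- ===== SOURCE B (Python) =====
-- def SingleClassSeparate(predict_y, true_y, true_y_label):
--     labels = [1, 2, 3, 4, 5]
--     predict_classes = [[p for p, l in zip(predict_y, true_y_label) if l == n] for n in labels]
--     true_classes = [[t for t, l in zip(true_y, true_y_label) if l == n] for n in labels]
--     return predict_classes, true_classes
-- ===== Notes on version B (the rewrite author's own statement) =====
-- stated objective: idiomatic
-- what changed: A's single index-driven while loop dispatching each element into one of ten named accumulator lists is replaced by per-class zip-and-filter comprehensions: for each label 1..5 the class lists are built by one filtering pass over zip(values, labels).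
import Mathlib
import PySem

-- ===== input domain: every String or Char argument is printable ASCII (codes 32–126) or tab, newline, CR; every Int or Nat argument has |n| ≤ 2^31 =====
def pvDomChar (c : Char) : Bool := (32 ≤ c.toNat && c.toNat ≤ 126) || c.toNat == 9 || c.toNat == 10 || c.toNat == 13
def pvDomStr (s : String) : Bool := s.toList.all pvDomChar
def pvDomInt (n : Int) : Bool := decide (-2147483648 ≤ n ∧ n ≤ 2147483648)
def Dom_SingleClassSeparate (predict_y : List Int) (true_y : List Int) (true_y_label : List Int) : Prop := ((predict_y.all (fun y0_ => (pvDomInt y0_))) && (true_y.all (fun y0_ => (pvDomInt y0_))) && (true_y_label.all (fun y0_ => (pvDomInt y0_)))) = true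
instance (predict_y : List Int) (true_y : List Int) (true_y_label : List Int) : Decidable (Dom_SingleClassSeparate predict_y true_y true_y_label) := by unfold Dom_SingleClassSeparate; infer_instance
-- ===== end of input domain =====

-- B replaces A's single dispatching while-loop with per-class zip-and-filter passes (idiomatic decomposition, same cost).

-- ===== PORT A =====
-- loop body of A's while loop: state = the ten accumulator lists (five predict, five true)
def pvStepA (predict_y : List Int) (true_y : List Int) (true_y_label : List Int)
    (s : (List Int × List Int × List Int × List Int × List Int) × (List Int × List Int × List Int × List Int × List Int))
    (i : Int) : (List Int × List Int × List Int × List Int × List Int) × (List Int × List Int × List Int × List Int × List Int) :=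
  -- pyGetD is exact here: Pre_ guarantees every index actually read in a taken branch is in range
  let l := PySem.List.pyGetD true_y_label i 0
  let pv := PySem.List.pyGetD predict_y i 0
  let tv := PySem.List.pyGetD true_y i 0
  let ((c1, c2, c3, c4, c5), (d1, d2, d3, d4, d5)) := s
  if l = 1 then ((c1 ++ [pv], c2, c3, c4, c5), (d1 ++ [tv], d2, d3, d4, d5))
  else if l = 2 then ((c1, c2 ++ [pv], c3, c4, c5), (d1, d2 ++ [tv], d3, d4, d5))
  else if l = 3 then ((c1, c2, c3 ++ [pv], c4, c5), (d1, d2, d3 ++ [tv], d4, d5))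
  else if l = 4 then ((c1, c2, c3, c4 ++ [pv], c5), (d1, d2, d3, d4 ++ [tv], d5))
  else if l = 5 then ((c1, c2, c3, c4, c5 ++ [pv]), (d1, d2, d3, d4, d5 ++ [tv]))
  else ((c1, c2, c3, c4, c5), (d1, d2, d3, d4, d5))

def SingleClassSeparate (predict_y : List Int) (true_y : List Int) (true_y_label : List Int) : List (List Int) × List (List Int) :=
  let length := PySem.List.len true_y_label
  let s := (PySem.List.pyRange 0 length 1).foldl (pvStepA predict_y true_y true_y_label)
    (([], [], [], [], []), ([], [], [], [], []))
  ([s.1.1, s.1.2.1, s.1.2.2.1, s.1.2.2.2.1, s.1.2.2.2.2],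
   [s.2.1, s.2.2.1, s.2.2.2.1, s.2.2.2.2.1, s.2.2.2.2.2])

-- ===== PORT B =====
-- [p for p, l in zip(ys, labels) if l == n]
def pvClassOf (ys : List Int) (labels : List Int) (n : Int) : List Int :=
  ((ys.zip labels).filter (fun q => q.2 == n)).map (fun q => q.1)

def SingleClassSeparate_alt (predict_y : List Int) (true_y : List Int) (true_y_label : List Int) : List (List Int) × List (List Int) :=
  let labels : List Int := [1, 2, 3, 4, 5]
  (labels.map (fun n => pvClassOf predict_y true_y_label n),
   labels.map (fun n => pvClassOf true_y true_y_label n))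

-- ===== PRECONDITION & SPEC =====
-- Pre_ excludes exactly the inputs where A raises IndexError: some index whose label is in 1..5
-- is out of range for predict_y or true_y.
def Pre_SingleClassSeparate (predict_y : List Int) (true_y : List Int) (true_y_label : List Int) : Prop :=
  ∀ i : Nat, (h : i < true_y_label.length) → (1 ≤ true_y_label[i] ∧ true_y_label[i] ≤ 5) →
    (i < predict_y.length ∧ i < true_y.length)
instance (predict_y : List Int) (true_y : List Int) (true_y_label : List Int) : Decidable (Pre_SingleClassSeparate predict_y true_y true_y_label) := by unfold Pre_SingleClassSeparate; infer_instance

def pvWitness_SingleClassSeparate : List Int × List Int × List Int := ([10, 20, 30], [1, 2, 3], [1, 5, 1])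

def Spec_SingleClassSeparate (predict_y : List Int) (true_y : List Int) (true_y_label : List Int) (out : List (List Int) × List (List Int)) : Prop := out = SingleClassSeparate_alt predict_y true_y true_y_label
instance (predict_y : List Int) (true_y : List Int) (true_y_label : List Int) (out : List (List Int) × List (List Int)) : Decidable (Spec_SingleClassSeparate predict_y true_y true_y_label out) := by unfold Spec_SingleClassSeparate; infer_instance

-- ===== CLAIM (what is proved, stated in full; the proofs are below) =====
def Claim_equal_SingleClassSeparate : Prop := ∀ (predict_y : List Int) (true_y : List Int) (true_y_label : List Int), Dom_SingleClassSeparate predict_y true_y true_y_label → Pre_SingleClassSeparate predict_y true_y true_y_label → Spec_SingleClassSeparate predict_y true_y true_y_label (SingleClassSeparate predict_y true_y true_y_label)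


-- ===== LEMMAS AND PROOFS =====

-- the class list built from the first k pairs of ys.zip labels
def pvClassUpTo (ys : List Int) (labels : List Int) (n : Int) (k : Nat) : List Int :=
  (((ys.zip labels).take k).filter (fun q => q.2 == n)).map (fun q => q.1)

theorem pvClassUpTo_zero (ys labels : List Int) (n : Int) : pvClassUpTo ys labels n 0 = [] := rfl

theorem pvClassUpTo_succ_in (ys labels : List Int) (n : Int) (k : Nat)
    (hk : k < labels.length) (hy : k < ys.length) :
    pvClassUpTo ys labels n (k + 1) =
      pvClassUpTo ys labels n k ++ (if labels[k] = n then [ys[k]] else []) := by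
  unfold pvClassUpTo
  have hz : k < (ys.zip labels).length := by simp [List.length_zip]; omega
  rw [List.take_add_one, List.getElem?_eq_getElem hz]
  simp [List.filter_append, List.getElem_zip]
  split_ifs with h <;> simp [h]

theorem pvClassUpTo_succ_out (ys labels : List Int) (n : Int) (k : Nat)
    (hk : k < labels.length) (hn : labels[k] ≠ n) :
    pvClassUpTo ys labels n (k + 1) = pvClassUpTo ys labels n k := by
  unfold pvClassUpTo
  rcases lt_or_ge k (ys.length) with hy | hy
  · have hz : k < (ys.zip labels).length := by simp [List.length_zip]; omega
    rw [List.take_add_one, List.getElem?_eq_getElem hz]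
    simp [List.filter_append, List.getElem_zip, hn]
  · have hz : (ys.zip labels).length ≤ k := by simp [List.length_zip]; omega
    rw [List.take_add_one, List.getElem?_eq_none hz]
    simp

theorem pvInv (predict_y true_y true_y_label : List Int)
    (hpre : Pre_SingleClassSeparate predict_y true_y true_y_label)
    (k : Nat) (hk : k ≤ true_y_label.length) :
    (PySem.List.pyRange 0 (k : Int) 1).foldl (pvStepA predict_y true_y true_y_label)
      (([], [], [], [], []), ([], [], [], [], [])) =
    ((pvClassUpTo predict_y true_y_label 1 k, pvClassUpTo predict_y true_y_label 2 k,
      pvClassUpTo predict_y true_y_label 3 k, pvClassUpTo predict_y true_y_label 4 k,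
      pvClassUpTo predict_y true_y_label 5 k),
     (pvClassUpTo true_y true_y_label 1 k, pvClassUpTo true_y true_y_label 2 k,
      pvClassUpTo true_y true_y_label 3 k, pvClassUpTo true_y true_y_label 4 k,
      pvClassUpTo true_y true_y_label 5 k)) := by
  induction k with
  | zero => simp [PySem.List.pyRange_one_eq_nil, pvClassUpTo_zero]
  | succ k ih =>
    have hk' : k ≤ true_y_label.length := by omega
    have hklt : k < true_y_label.length := by omega
    have hcast : ((k + 1 : Nat) : Int) = (k : Int) + 1 := by push_cast; ring
    rw [hcast, PySem.List.pyRange_one_succ_right (by positivity), List.foldl_append, ih hk']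
    have hl : PySem.List.pyGetD true_y_label (k : Int) 0 = true_y_label[k] := by
      simp [PySem.List.pyGetD_natCast, List.getD, List.getElem?_eq_getElem hklt]
    by_cases hin : 1 ≤ true_y_label[k] ∧ true_y_label[k] ≤ 5
    · obtain ⟨hp, ht⟩ := hpre k hklt hin
      have hpv : PySem.List.pyGetD predict_y (k : Int) 0 = predict_y[k] := by
        simp [PySem.List.pyGetD_natCast, List.getD, List.getElem?_eq_getElem hp]
      have htv : PySem.List.pyGetD true_y (k : Int) 0 = true_y[k] := by
        simp [PySem.List.pyGetD_natCast, List.getD, List.getElem?_eq_getElem ht]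
      simp only [List.foldl_cons, List.foldl_nil, pvStepA, hl, hpv, htv]
      rw [pvClassUpTo_succ_in predict_y true_y_label 1 k hklt hp,
          pvClassUpTo_succ_in predict_y true_y_label 2 k hklt hp,
          pvClassUpTo_succ_in predict_y true_y_label 3 k hklt hp,
          pvClassUpTo_succ_in predict_y true_y_label 4 k hklt hp,
          pvClassUpTo_succ_in predict_y true_y_label 5 k hklt hp,
          pvClassUpTo_succ_in true_y true_y_label 1 k hklt ht,
          pvClassUpTo_succ_in true_y true_y_label 2 k hklt ht,
          pvClassUpTo_succ_in true_y true_y_label 3 k hklt ht,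
          pvClassUpTo_succ_in true_y true_y_label 4 k hklt ht,
          pvClassUpTo_succ_in true_y true_y_label 5 k hklt ht]
      obtain ⟨hlo, hhi⟩ := hin
      interval_cases h : true_y_label[k] <;> simp
    · have h1 : true_y_label[k] ≠ 1 := by omega
      have h2 : true_y_label[k] ≠ 2 := by omega
      have h3 : true_y_label[k] ≠ 3 := by omega
      have h4 : true_y_label[k] ≠ 4 := by omega
      have h5 : true_y_label[k] ≠ 5 := by omega
      simp only [List.foldl_cons, List.foldl_nil, pvStepA, hl]
      rw [pvClassUpTo_succ_out predict_y true_y_label 1 k hklt h1,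
          pvClassUpTo_succ_out predict_y true_y_label 2 k hklt h2,
          pvClassUpTo_succ_out predict_y true_y_label 3 k hklt h3,
          pvClassUpTo_succ_out predict_y true_y_label 4 k hklt h4,
          pvClassUpTo_succ_out predict_y true_y_label 5 k hklt h5,
          pvClassUpTo_succ_out true_y true_y_label 1 k hklt h1,
          pvClassUpTo_succ_out true_y true_y_label 2 k hklt h2,
          pvClassUpTo_succ_out true_y true_y_label 3 k hklt h3,
          pvClassUpTo_succ_out true_y true_y_label 4 k hklt h4,
          pvClassUpTo_succ_out true_y true_y_label 5 k hklt h5]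
      simp [h1, h2, h3, h4, h5]

theorem pvClassUpTo_full (ys labels : List Int) (n : Int) :
    pvClassUpTo ys labels n labels.length = pvClassOf ys labels n := by
  unfold pvClassUpTo pvClassOf
  rw [List.take_of_length_le (by simp [List.length_zip])]

-- ===== VERDICT (by name: the statement is the Claim_ definition above) =====
theorem SingleClassSeparate_spec : Claim_equal_SingleClassSeparate := by
  intro p t lab _ hpre
  unfold Spec_SingleClassSeparate SingleClassSeparate SingleClassSeparate_alt
  simp only [PySem.List.len_eq]
  rw [pvInv p t lab hpre lab.length le_rfl]
  simp [pvClassUpTo_full, List.map]
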